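-- pv_equiv track=rewrite | github.com/zeta1999/korali | source/modules/build.py | getCXXVariableName
-- ===== SOURCE A (Python) =====
-- def getCXXVariableName(v):
--  cVarName = ''
--  for name in v: cVarName += name
--  cVarName = cVarName.replace(" ", "")
--  cVarName = cVarName.replace("(", "")
--  cVarName = cVarName.replace(")", "")
--  cVarName = cVarName.replace("+", "")
--  cVarName = cVarName.replace("-", "")
--  cVarName = cVarName.replace("[", "")
--  cVarName = cVarName.replace("]", "")
--  cVarName = '_' + cVarName[0].lower() + cVarName[1:]
--  return cVarName
-- ===== SOURCE B (Python) =====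
-- BAD = set(' ()+-[]')
--
-- def getCXXVariableName(v):
--     s = ''.join(v)
--     s = ''.join(c for c in s if c not in BAD)
--     return '_' + s[0].lower() + s[1:]
-- ===== Notes on version B (the rewrite author's own statement) =====
-- stated objective: simpler
-- what changed: Replaces the seven sequential full-string .replace scans with one join plus a single-pass filter against a set of bad characters; Pre_ excludes only inputs where every character is removed, on which both A and B raise IndexError.
import Mathlib
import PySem

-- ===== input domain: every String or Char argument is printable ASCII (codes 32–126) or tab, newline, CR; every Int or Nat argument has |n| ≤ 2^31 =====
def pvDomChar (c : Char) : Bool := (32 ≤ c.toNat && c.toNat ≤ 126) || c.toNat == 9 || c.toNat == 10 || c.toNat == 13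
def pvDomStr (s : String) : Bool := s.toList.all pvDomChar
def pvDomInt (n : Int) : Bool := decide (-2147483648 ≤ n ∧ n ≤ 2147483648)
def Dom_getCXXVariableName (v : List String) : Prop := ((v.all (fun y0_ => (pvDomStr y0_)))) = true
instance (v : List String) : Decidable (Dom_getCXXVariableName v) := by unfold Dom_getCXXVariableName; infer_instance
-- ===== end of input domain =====

-- B replaces A's seven sequential .replace scans by one join plus a single-pass filter (simpler).
-- Pre_ excludes inputs whose concatenation has every character removed: there Python A (and B) raise IndexError.

-- ===== PORT A =====
def getCXXVariableName (v : List String) : String :=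
  let cs0 : List Char := v.foldl (fun acc name => acc ++ name.toList) []
  let cs1 := PySem.Chars.replace cs0 [' '] []
  let cs2 := PySem.Chars.replace cs1 ['('] []
  let cs3 := PySem.Chars.replace cs2 [')'] []
  let cs4 := PySem.Chars.replace cs3 ['+'] []
  let cs5 := PySem.Chars.replace cs4 ['-'] []
  let cs6 := PySem.Chars.replace cs5 ['['] []
  let cs7 := PySem.Chars.replace cs6 [']'] []
  match cs7 with
  | [] => ""                       -- Python raises IndexError here; excluded by Pre_
  | c :: t => String.ofList ('_' :: (PySem.Chars.lower [c] ++ t))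

-- ===== PORT B =====
def pvBAD : List Char := [' ', '(', ')', '+', '-', '[', ']']

def getCXXVariableName_alt (v : List String) : String :=
  let s : List Char := PySem.Chars.join [] (v.map String.toList)
  let s := s.filter (fun c => !(pvBAD.contains c))
  match s with
  | [] => ""                       -- Python raises IndexError here; excluded by Pre_
  | c :: t => String.ofList ('_' :: (PySem.Chars.lower [c] ++ t))

-- ===== PRECONDITION & SPEC =====
-- Pre_ excludes exactly the inputs where every concatenated character is one of " ()+-[]" (or v is empty):
-- there Python's cVarName[0] raises IndexError in both programs.
def Pre_getCXXVariableName (v : List String) : Prop :=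
  (v.any (fun s => s.toList.any (fun c => !(pvBAD.contains c)))) = true
instance (v : List String) : Decidable (Pre_getCXXVariableName v) := by
  unfold Pre_getCXXVariableName; infer_instance

def pvWitness_getCXXVariableName : List String := ["Hello World"]

def Spec_getCXXVariableName (v : List String) (out : String) : Prop := out = getCXXVariableName_alt v
instance (v : List String) (out : String) : Decidable (Spec_getCXXVariableName v out) := by
  unfold Spec_getCXXVariableName; infer_instance

-- ===== CLAIM (what is proved, stated in full; the proofs are below) =====
def Claim_equal_getCXXVariableName : Prop := ∀ (v : List String), Dom_getCXXVariableName v → Pre_getCXXVariableName v → Spec_getCXXVariableName v (getCXXVariableName v)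

-- ===== LEMMAS AND PROOFS =====

-- single-character old, empty new: replace is a filter
theorem pv_go_single (c : Char) : ∀ (fuel : Nat) (l acc : List Char), l.length ≤ fuel →
    PySem.Chars.replace.go [c] [] fuel l acc = acc.reverse ++ l.filter (fun x => x != c) := by
  intro fuel
  induction fuel with
  | zero => intro l acc h; cases l with
    | nil => simp [PySem.Chars.replace.go]
    | cons a t => simp at h
  | succ n ih =>
    intro l acc h
    cases l with
    | nil => simp [PySem.Chars.replace.go]
    | cons a t =>
      by_cases hc : a = c
      · subst hc
        have : PySem.Chars.replace.go [a] [] (n+1) (a :: t) acc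
            = PySem.Chars.replace.go [a] [] n t acc := by
          simp [PySem.Chars.replace.go, List.isPrefixOf]
        rw [this, ih t acc (by simpa using h)]
        simp
      · have : PySem.Chars.replace.go [c] [] (n+1) (a :: t) acc
            = PySem.Chars.replace.go [c] [] n t (a :: acc) := by
          simp [PySem.Chars.replace.go, List.isPrefixOf, Ne.symm hc]
        rw [this, ih t (a :: acc) (by simpa using h)]
        simp [hc]

theorem pv_replace_single (c : Char) (l : List Char) :
    PySem.Chars.replace l [c] [] = l.filter (fun x => x != c) := by
  simpa using pv_go_single c l.length l [] (le_refl _)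

theorem pv_foldl_flatten (v : List String) : ∀ acc : List Char,
    v.foldl (fun acc name => acc ++ name.toList) acc = acc ++ (v.map String.toList).flatten := by
  induction v with
  | nil => simp
  | cons s t ih => intro acc; simp [List.foldl_cons, ih]

theorem pv_filters_eq (l : List Char) :
    ((((((l.filter (fun x => x != ' ')).filter (fun x => x != '(')).filter
        (fun x => x != ')')).filter (fun x => x != '+')).filter (fun x => x != '-')).filter
        (fun x => x != '[')).filter (fun x => x != ']')
      = l.filter (fun c => !(pvBAD.contains c)) := by
  simp only [List.filter_filter]
  apply List.filter_congr
  intro x _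
  show ((x != ']') && ((x != '[') && ((x != '-') && ((x != '+') && ((x != ')') && ((x != '(') && (x != ' '))))))) = !(pvBAD.contains x)
  simp only [pvBAD, List.contains_cons, List.contains_nil, bne, Bool.or_false]
  cases h1 : x == ' ' <;> cases h2 : x == '(' <;> cases h3 : x == ')' <;>
    cases h4 : x == '+' <;> cases h5 : x == '-' <;> cases h6 : x == '[' <;>
    cases h7 : x == ']' <;> simp_all

theorem pv_join_nil (parts : List (List Char)) :
    PySem.Chars.join [] parts = parts.flatten := by
  simp [PySem.Chars.join, List.intercalate]
  induction parts with
  | nil => simp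
  | cons a t ih =>
    cases t with
    | nil => simp [List.intersperse]
    | cons b u => simp_all [List.intersperse]

-- ===== VERDICT (by name: the statement is the Claim_ definition above) =====
theorem getCXXVariableName_spec : Claim_equal_getCXXVariableName := by
  intro v _ _
  unfold Spec_getCXXVariableName getCXXVariableName getCXXVariableName_alt
  simp only [pv_replace_single, pv_foldl_flatten, pv_join_nil, List.nil_append, pv_filters_eq]
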